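-- pv_equiv track=rewrite | github.com/solsword/procedural | app/static/python_modules/maze.py | getRobotPositionAndFacing
-- ===== SOURCE A (Python) =====
-- FORWARD = 0
--
-- RIGHT = 1
--
-- BACKWARD = 2
--
-- LEFT = 3
--
-- def getRobotPositionAndFacing(maze):
--   """
--   Looks at a maze and finds a robot in it, returning the coordinates and
--   facing of the robot.
--   """
--   rows = maze.split('\n')
--   for y, row in enumerate(rows):
--     for x, char in enumerate(row):
--       if char == '^':
--         return [x, y, FORWARD]
--       elif char == '>':
--         return [x, y, RIGHT]
--       elif char == 'v':
--         return [x, y, BACKWARD]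
--       elif char == '<':
--         return [x, y, LEFT]
--       # else continue searching for the robot in the maze
--   # Unable to find robot?!?!
--   raise ValueError("No robot in the maze!")
-- ===== SOURCE B (Python) =====
-- MARKERS = [('^', 0), ('>', 1), ('v', 2), ('<', 3)]
--
-- def getRobotPositionAndFacing(maze):
--   """
--   Finds the robot marker via str.find per marker (earliest wins) and converts
--   the flat index to coordinates arithmetically, instead of a nested row scan.
--   """
--   best = None
--   for c, f in MARKERS:
--     i = maze.find(c)
--     if i != -1 and (best is None or i < best[0]):
--       best = (i, f)
--   if best is None:
--     raise ValueError("No robot in the maze!")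
--   idx, facing = best
--   pre = maze[:idx]
--   y = pre.count('\n')
--   x = idx - pre.rfind('\n') - 1
--   return [x, y, facing]
-- ===== Notes on version B (the rewrite author's own statement) =====
-- stated objective: alternative
-- what changed: Replaces the split-into-rows nested enumerate scan with one str.find per marker, taking the minimum flat index and recovering (x, y) arithmetically from the newline count and last newline position of the prefix before that index.
import Mathlib
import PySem

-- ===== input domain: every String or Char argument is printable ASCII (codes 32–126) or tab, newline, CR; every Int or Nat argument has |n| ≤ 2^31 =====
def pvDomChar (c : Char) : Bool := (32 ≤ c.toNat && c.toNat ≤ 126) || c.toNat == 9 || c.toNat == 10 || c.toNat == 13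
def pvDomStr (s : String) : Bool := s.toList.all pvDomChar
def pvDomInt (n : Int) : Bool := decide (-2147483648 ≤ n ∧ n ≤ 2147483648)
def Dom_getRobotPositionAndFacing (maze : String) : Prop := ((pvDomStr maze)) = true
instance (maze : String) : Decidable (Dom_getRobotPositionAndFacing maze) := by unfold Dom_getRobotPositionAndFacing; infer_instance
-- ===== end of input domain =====

-- B replaces A's row-split nested scan by per-marker find + minimum + index arithmetic (alternative, same cost).
-- Where A raises ValueError (no marker), Pre_ excludes the input and both ports return [].

-- ===== PORT A =====
-- inner loop 'for x, char in enumerate(row)' with the four early-return branches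
def pvScanRow (y : Int) : Int → List Char → Option (List Int)
  | _, [] => none
  | x, ch :: t =>
    if ch = '^' then some [x, y, 0]
    else if ch = '>' then some [x, y, 1]
    else if ch = 'v' then some [x, y, 2]
    else if ch = '<' then some [x, y, 3]
    else pvScanRow y (x + 1) t

-- outer loop 'for y, row in enumerate(rows)'
def pvScanRows : Int → List (List Char) → Option (List Int)
  | _, [] => none
  | y, r :: rs =>
    match pvScanRow y 0 r with
    | some v => some v
    | none => pvScanRows (y + 1) rs

def getRobotPositionAndFacing (maze : String) : List Int :=
  let rows := ((PySem.Str.split? maze "\n").getD []).map String.toList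
  match pvScanRows 0 rows with
  | some v => v
  | none => []   -- Python raises ValueError here; excluded by Pre_

-- ===== PORT B =====
-- 'for c, f in MARKERS: i = maze.find(c); if i != -1 and (best is None or i < best[0]): best = (i, f)'
def pvBestFold (maze : String) (ms : List (String × Int)) : Option (Int × Int) :=
  ms.foldl
    (fun best p =>
      let i := PySem.Str.find maze p.1
      if i ≠ -1 ∧ (best.isNone ∨ (∃ b, best = some b ∧ i < b.1)) then some (i, p.2) else best)
    none

def getRobotPositionAndFacing_alt (maze : String) : List Int :=
  let best := pvBestFold maze [("^", 0), (">", 1), ("v", 2), ("<", 3)]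
  match best with
  | none => []   -- Python raises ValueError here; excluded by Pre_
  | some (idx, facing) =>
    let pre := PySem.Str.slice maze none (some idx)
    let y : Int := PySem.Str.count pre "\n"
    let x : Int := idx - PySem.Str.rfind pre "\n" - 1
    [x, y, facing]

-- ===== PRECONDITION & SPEC =====
-- Pre_: the maze contains a robot marker; on inputs without one, A raises ValueError.
def Pre_getRobotPositionAndFacing (maze : String) : Prop :=
  maze.toList.any (fun c => c = '^' ∨ c = '>' ∨ c = 'v' ∨ c = '<') = true
instance (maze : String) : Decidable (Pre_getRobotPositionAndFacing maze) := by
  unfold Pre_getRobotPositionAndFacing; infer_instance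

def pvWitness_getRobotPositionAndFacing : String := "#.#\n.^#"

def Spec_getRobotPositionAndFacing (maze : String) (out : List Int) : Prop := out = getRobotPositionAndFacing_alt maze
instance (maze : String) (out : List Int) : Decidable (Spec_getRobotPositionAndFacing maze out) := by unfold Spec_getRobotPositionAndFacing; infer_instance

-- ===== CLAIM (what is proved, stated in full; the proofs are below) =====
def Claim_equal_getRobotPositionAndFacing : Prop := ∀ (maze : String), Dom_getRobotPositionAndFacing maze → Pre_getRobotPositionAndFacing maze → Spec_getRobotPositionAndFacing maze (getRobotPositionAndFacing maze)


-- ===== LEMMAS AND PROOFS =====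

def pvIsMark (c : Char) : Bool := c == '^' || c == '>' || c == 'v' || c == '<'

def pvFace (c : Char) : Int :=
  if c = '^' then 0 else if c = '>' then 1 else if c = 'v' then 2 else 3

theorem go_find_single (c : Char) : ∀ (cs : List Char) (k : Nat),
    PySem.Chars.find.go [c] cs k =
      match cs.idxOf? c with
      | none => -1
      | some j => ((k + j : Nat) : Int) := by
  intro cs
  induction cs with
  | nil => intro k; simp [PySem.Chars.find.go, List.idxOf?]
  | cons a t ih =>
    intro k
    by_cases h : a = c
    · subst h
      simp [PySem.Chars.find.go, List.isPrefixOf, List.idxOf?_cons]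
    · have hne : (c == a) = false := by simp [Ne.symm h]
      simp only [PySem.Chars.find.go, List.isPrefixOf, hne, Bool.false_and, Bool.false_eq_true, if_false]
      rw [ih (k+1), List.idxOf?_cons]
      simp only [beq_iff_eq, if_neg h]
      cases htc : t.idxOf? c with
      | none => simp
      | some j => simp; push_cast; ring

theorem find_single (cs : List Char) (c : Char) :
    PySem.Chars.find cs [c] =
      match cs.idxOf? c with
      | none => -1
      | some j => (j : Int) := by
  have := go_find_single c cs 0
  simpa [PySem.Chars.find] using this

theorem rfind_go_zero (s : List Char) (sub : List Char) :
    PySem.Chars.rfind.go s sub 0 = if sub.isPrefixOf s then 0 else -1 := rfl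

theorem rfind_go_succ (s sub : List Char) (j : Nat) :
    PySem.Chars.rfind.go s sub (j + 1) =
      if sub.isPrefixOf (List.drop (j + 1) s) then ((j + 1 : Nat) : Int) else PySem.Chars.rfind.go s sub j := by
  rw [PySem.Chars.rfind.go.eq_def]

theorem prefixOf_single (c : Char) (l : List Char) :
    [c].isPrefixOf l = (l.head? == some c) := by
  cases l with
  | nil => simp [List.isPrefixOf]
  | cons a t => simp [List.isPrefixOf, BEq.comm]

def pvRLast (s : List Char) (c : Char) : Nat → Int
  | 0 => if s.head? = some c then 0 else -1
  | j+1 => if s[j+1]? = some c then ((j+1 : Nat) : Int) else pvRLast s c j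

theorem go_eq_pvRLast (s : List Char) (c : Char) : ∀ j,
    PySem.Chars.rfind.go s [c] j = pvRLast s c j := by
  intro j
  induction j with
  | zero =>
    rw [rfind_go_zero, prefixOf_single]
    simp [pvRLast]
  | succ j ih =>
    rw [rfind_go_succ, prefixOf_single, pvRLast, ← ih, List.head?_drop]
    simp

theorem pvRLast_ge (s : List Char) (c : Char) : ∀ j, -1 ≤ pvRLast s c j := by
  intro j
  induction j with
  | zero => rw [pvRLast]; split <;> omega
  | succ j ih => rw [pvRLast]; split; · omega
                 · exact ih

theorem pvRLast_shift (a c : Char) (t : List Char) : ∀ j,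
    pvRLast (a :: t) c (j + 1) =
      if pvRLast t c j = -1 then (if a = c then 0 else -1) else pvRLast t c j + 1 := by
  intro j
  induction j with
  | zero =>
    rw [pvRLast, pvRLast, pvRLast]
    simp only [List.getElem?_cons_succ, List.head?]
    cases t with
    | nil => simp
    | cons b t' =>
      simp only [List.getElem?_cons_zero, List.head?]
      by_cases hb : b = c <;> simp [hb]
  | succ j ih =>
    rw [show pvRLast (a :: t) c (j + 1 + 1) =
          if (a :: t)[j + 1 + 1]? = some c then ((j + 1 + 1 : Nat) : Int) else pvRLast (a :: t) c (j + 1) from rfl,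
        show pvRLast t c (j + 1) =
          if t[j + 1]? = some c then ((j + 1 : Nat) : Int) else pvRLast t c j from rfl]
    simp only [List.getElem?_cons_succ]
    by_cases hp : t[j + 1]? = some c
    · simp [hp]
      omega
    · simp only [hp, if_false, ih]

theorem rfind_nil (c : Char) : PySem.Chars.rfind [] [c] = -1 := rfl

theorem rfind_cons' (a c : Char) (t : List Char) :
    PySem.Chars.rfind (a :: t) [c] =
      if PySem.Chars.rfind t [c] = -1 then (if a = c then 0 else -1)
      else PySem.Chars.rfind t [c] + 1 := by
  show PySem.Chars.rfind.go (a :: t) [c] (a :: t).length = _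
  rw [List.length_cons, go_eq_pvRLast, pvRLast_shift]
  rw [show PySem.Chars.rfind t [c] = pvRLast t c t.length from go_eq_pvRLast t c t.length]

theorem rfind_eq_neg_one_iff_single (c : Char) : ∀ (t : List Char),
    PySem.Chars.rfind t [c] = -1 ↔ c ∉ t := by
  intro t
  induction t with
  | nil => simp [rfind_nil]
  | cons a t ih =>
    rw [rfind_cons']
    by_cases h : PySem.Chars.rfind t [c] = -1
    · have hct : c ∉ t := ih.mp h
      by_cases ha : a = c <;> simp [h, ha, hct]
      exact fun hca => ha hca.symm
    · have hle : -1 ≤ PySem.Chars.rfind t [c] := by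
        have := pvRLast_ge t c t.length
        simpa [show PySem.Chars.rfind t [c] = pvRLast t c t.length from go_eq_pvRLast t c t.length]
      have hmem : c ∈ t := by by_contra hn; exact h (ih.mpr hn)
      simp only [h, if_false]
      constructor
      · intro hh; omega
      · intro hm; exact absurd hmem (by simp at hm; tauto)

theorem rfind_cons (a c : Char) (t : List Char) :
    PySem.Chars.rfind (a :: t) [c] =
      if c ∈ t then PySem.Chars.rfind t [c] + 1 else (if a = c then 0 else -1) := by
  rw [rfind_cons']
  by_cases hm : c ∈ t
  · have h : ¬ PySem.Chars.rfind t [c] = -1 := fun h => (rfind_eq_neg_one_iff_single c t).mp h hm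
    simp [hm, h]
  · simp [hm, (rfind_eq_neg_one_iff_single c t).mpr hm]

theorem rfind_append_sep (c : Char) : ∀ (row pre : List Char), c ∉ row →
    PySem.Chars.rfind (row ++ c :: pre) [c] =
      if c ∈ pre then (row.length : Int) + 1 + PySem.Chars.rfind pre [c] else (row.length : Int) := by
  intro row
  induction row with
  | nil =>
    intro pre _
    rw [List.nil_append, rfind_cons]
    by_cases hm : c ∈ pre <;> simp [hm]
    ring
  | cons a row ih =>
    intro pre hc
    have ha : c ≠ a := fun h => hc (by simp [h])
    have hcrow : c ∉ row := fun h => hc (by simp [h])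
    rw [List.cons_append, rfind_cons]
    have hmem : c ∈ row ++ c :: pre := by simp
    rw [if_pos hmem, ih pre hcrow]
    by_cases hm : c ∈ pre <;> simp [hm] <;> push_cast <;> ring

theorem count_go_single (c : Char) : ∀ (fuel : Nat) (s : List Char) (acc : Nat), s.length ≤ fuel →
    PySem.Chars.count.go [c] fuel s acc = acc + s.count c := by
  intro fuel
  induction fuel with
  | zero =>
    intro s acc h
    have : s = [] := List.length_eq_zero_iff.mp (by omega)
    subst this; rfl
  | succ fuel ih =>
    intro s acc h
    cases s with
    | nil => rfl
    | cons a t =>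
      rw [PySem.Chars.count.go.eq_def]
      simp only [prefixOf_single, List.head?]
      simp only [List.length_cons] at h
      by_cases hac : a = c
      · subst hac
        simp only [beq_self_eq_true, if_true, List.length_cons]
        rw [show List.drop ([].length + 1) (a :: t) = t from by simp]
        rw [ih t (acc + 1) (by omega)]
        simp [List.count_cons]
        omega
      · have : (some a == some c) = false := by simp [hac]
        simp only [this, Bool.false_eq_true, if_false]
        rw [ih t acc (by omega)]
        simp [List.count_cons, hac]

theorem count_single (s : List Char) (c : Char) :
    PySem.Chars.count s [c] = s.count c := by
  rw [PySem.Chars.count]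
  simp only [List.isEmpty_cons, Bool.false_eq_true, if_false]
  simpa using count_go_single c s.length s 0 le_rfl

theorem splitOn_go_no_sep (c : Char) : ∀ (fuel : Nat) (l cur : List Char) (acc : List (List Char)),
    c ∉ l → l.length ≤ fuel →
    PySem.Chars.splitOn.go [c] fuel l cur acc = ((cur.reverse ++ l) :: acc).reverse := by
  intro fuel
  induction fuel with
  | zero => intro l cur acc _ _; rw [PySem.Chars.splitOn.go.eq_def]
  | succ fuel ih =>
    intro l cur acc hc hl
    cases l with
    | nil => rw [PySem.Chars.splitOn.go.eq_def]; simp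
    | cons a t =>
      have hac : (some a == some c) = false := by
        simp only [Option.some_beq_some, beq_eq_false_iff_ne, ne_eq]
        exact fun h => hc (by simp [h])
      rw [PySem.Chars.splitOn.go.eq_def]
      simp only [prefixOf_single, List.head?, hac, Bool.false_eq_true, if_false]
      rw [ih t (a :: cur) acc (fun h => hc (by simp [h])) (by simp at hl; omega)]
      simp

theorem splitOn_go_sep (c : Char) : ∀ (row : List Char) (fuel : Nat) (l cur : List Char) (acc : List (List Char)),
    c ∉ row → row.length + 1 + l.length ≤ fuel →
    PySem.Chars.splitOn.go [c] fuel (row ++ c :: l) cur acc =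
      PySem.Chars.splitOn.go [c] (fuel - row.length - 1) l [] ((cur.reverse ++ row) :: acc) := by
  intro row
  induction row with
  | nil =>
    intro fuel l cur acc _ hf
    cases fuel with
    | zero => omega
    | succ fuel =>
      rw [PySem.Chars.splitOn.go.eq_def]
      simp only [List.nil_append, prefixOf_single, List.head?, beq_self_eq_true, if_true]
      simp
  | cons a row ih =>
    intro fuel l cur acc hc hf
    cases fuel with
    | zero => simp at hf
    | succ fuel =>
      have hac : (some a == some c) = false := by
        simp only [Option.some_beq_some, beq_eq_false_iff_ne, ne_eq]
        exact fun h => hc (by simp [h])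
      rw [List.cons_append, PySem.Chars.splitOn.go.eq_def]
      simp only [prefixOf_single, List.head?, hac, Bool.false_eq_true, if_false]
      rw [ih fuel l (a :: cur) acc (fun h => hc (by simp [h])) (by simp only [List.length_cons] at hf; omega)]
      simp only [List.reverse_cons, List.append_assoc, List.singleton_append, List.length_cons]
      congr 1
      omega

theorem splitOn_go_acc (c : Char) : ∀ (fuel : Nat) (l cur : List Char) (acc : List (List Char)),
    PySem.Chars.splitOn.go [c] fuel l cur acc = acc.reverse ++ PySem.Chars.splitOn.go [c] fuel l cur [] := by
  intro fuel
  induction fuel with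
  | zero => intro l cur acc; rw [PySem.Chars.splitOn.go.eq_def, PySem.Chars.splitOn.go.eq_def]; simp
  | succ fuel ih =>
    intro l cur acc
    cases l with
    | nil => rw [PySem.Chars.splitOn.go.eq_def, PySem.Chars.splitOn.go.eq_def]; simp
    | cons a t =>
      rw [PySem.Chars.splitOn.go.eq_def]
      rw [show PySem.Chars.splitOn.go [c] (fuel+1) (a :: t) cur [] =
        if [c].isPrefixOf (a :: t) then PySem.Chars.splitOn.go [c] fuel (List.drop [c].length (a :: t)) [] (cur.reverse :: ([] : List (List Char)))
        else PySem.Chars.splitOn.go [c] fuel t (a :: cur) [] from by rw [PySem.Chars.splitOn.go.eq_def]]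
      by_cases hp : [c].isPrefixOf (a :: t)
      · simp only [hp, if_true]
        rw [ih _ _ (cur.reverse :: acc), ih _ _ [cur.reverse]]
        simp
      · simp only [hp, Bool.false_eq_true, if_false]
        exact ih t (a :: cur) acc

theorem splitOn_no_sep (c : Char) (s : List Char) (h : c ∉ s) :
    PySem.Chars.splitOn s [c] = [s] := by
  rw [PySem.Chars.splitOn, splitOn_go_no_sep c _ s [] [] h (by omega)]
  simp

theorem splitOn_sep (c : Char) (row rest : List Char) (h : c ∉ row) :
    PySem.Chars.splitOn (row ++ c :: rest) [c] = row :: PySem.Chars.splitOn rest [c] := by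
  rw [PySem.Chars.splitOn, splitOn_go_sep c row _ rest [] [] h (by simp; omega)]
  rw [splitOn_go_acc]
  rw [PySem.Chars.splitOn]
  rw [show (row ++ c :: rest).length + 1 - row.length - 1 = rest.length + 1 from by simp; omega]
  simp

theorem scanRow_none (y : Int) : ∀ (row : List Char) (x : Int),
    (∀ i (hi : i < row.length), pvIsMark row[i] = false) →
    pvScanRow y x row = none := by
  intro row
  induction row with
  | nil => intro x _; rfl
  | cons a t ih =>
    intro x h
    have ha := h 0 (by simp)
    simp only [pvIsMark, List.getElem_cons_zero, Bool.or_eq_false_iff, beq_eq_false_iff_ne, ne_eq] at ha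
    rw [pvScanRow]
    simp only [ha.1.1.1, ha.1.1.2, ha.1.2, ha.2, if_false]
    exact ih (x + 1) (fun i hi => by simpa using h (i + 1) (by simpa using Nat.succ_lt_succ hi))

theorem scanRow_first (y : Int) : ∀ (row : List Char) (x : Int) (j : Nat) (hj : j < row.length),
    pvIsMark row[j] = true → (∀ i (hi : i < j), pvIsMark (row[i]'(by omega)) = false) →
    pvScanRow y x row = some [x + (j : Int), y, pvFace row[j]] := by
  intro row
  induction row with
  | nil => intro x j hj; simp at hj
  | cons a t ih =>
    intro x j hj hm hf
    cases j with
    | zero =>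
      simp only [List.getElem_cons_zero] at hm ⊢
      rw [pvScanRow]
      simp only [pvIsMark, Bool.or_eq_true, beq_iff_eq] at hm
      rcases hm with ((h|h)|h)|h <;> simp [h, pvFace]
    | succ j =>
      have ha := hf 0 (by omega)
      simp only [pvIsMark, List.getElem_cons_zero, Bool.or_eq_false_iff, beq_eq_false_iff_ne, ne_eq] at ha
      rw [pvScanRow]
      simp only [ha.1.1.1, ha.1.1.2, ha.1.2, ha.2, if_false]
      rw [ih (x + 1) j (by simpa using hj) (by simpa using hm)
        (fun i hi => by simpa using hf (i + 1) (by omega))]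
      simp only [List.getElem_cons_succ]
      congr 2
      push_cast
      ring

theorem idxOf?_first_marker (cs : List Char) (j : Nat) (hj : j < cs.length)
    (hm : pvIsMark cs[j] = true)
    (hf : ∀ i (hi : i < j), pvIsMark (cs[i]'(by omega)) = false) :
    cs.idxOf? cs[j] = some j := by
  rw [← PySem.List.index?_eq_idxOf?, PySem.List.index?_eq_some_iff]
  refine ⟨cs.take j, cs.drop (j + 1), ?_, by simp [List.length_take]; omega, ?_⟩
  · conv_lhs => rw [← List.take_append_drop j cs]
    rw [List.drop_eq_getElem_cons hj]
  · intro hmem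
    obtain ⟨i, hi, hEq⟩ := List.mem_iff_getElem.mp hmem
    have hilt : i < j := by simp [List.length_take] at hi; omega
    have := hf i hilt
    rw [show (cs.take j)[i] = cs[i]'(by omega) from List.getElem_take] at hEq
    rw [hEq] at this
    exact absurd hm (by simp [this])

theorem find_at_first_marker (cs : List Char) (j : Nat) (hj : j < cs.length)
    (hm : pvIsMark cs[j] = true) (hf : ∀ i (hi : i < j), pvIsMark (cs[i]'(by omega)) = false) :
    PySem.Chars.find cs [cs[j]] = (j : Int) := by
  rw [find_single, idxOf?_first_marker cs j hj hm hf]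

theorem find_other_marker (cs : List Char) (j : Nat) (hj : j < cs.length)
    (hf : ∀ i (hi : i < j), pvIsMark (cs[i]'(by omega)) = false)
    (c : Char) (hmc : pvIsMark c = true) (hne : c ≠ cs[j]) :
    PySem.Chars.find cs [c] = -1 ∨ (j : Int) < PySem.Chars.find cs [c] := by
  rw [find_single]
  cases hc : cs.idxOf? c with
  | none => exact Or.inl rfl
  | some k =>
    right
    rw [← PySem.List.index?_eq_idxOf?, PySem.List.index?_eq_some_iff] at hc
    obtain ⟨pre, suf, hcs, hlen, _⟩ := hc
    have hk : k < cs.length := by rw [hcs]; simp; omega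
    have hck : cs[k]'hk = c := by
      subst hcs hlen
      simp
    have hkj : k ≠ j := fun h => hne (by subst h; exact hck.symm)
    have : ¬ k < j := fun hlt => by
      have := hf k hlt
      rw [hck] at this
      exact absurd hmc (by simp [this])
    simp only [Nat.cast_lt]
    omega

theorem fold_stay (maze : String) : ∀ (ms : List (String × Int)) (j f : Int),
    (∀ p ∈ ms, PySem.Str.find maze p.1 = -1 ∨ j < PySem.Str.find maze p.1) →
    ms.foldl
      (fun best p =>
        let i := PySem.Str.find maze p.1
        if i ≠ -1 ∧ (best.isNone ∨ (∃ b, best = some b ∧ i < b.1)) then some (i, p.2) else best)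
      (some (j, f)) = some (j, f) := by
  intro ms
  induction ms with
  | nil => intro j f _; rfl
  | cons p ms ih =>
    intro j f h
    have hp := h p (by simp)
    rw [List.foldl_cons]
    have : (if PySem.Str.find maze p.1 ≠ -1 ∧ ((some (j, f)).isNone ∨ (∃ b, some (j, f) = some b ∧ PySem.Str.find maze p.1 < b.1)) then some (PySem.Str.find maze p.1, p.2) else some (j, f)) = some (j, f) := by
      rw [if_neg]
      rintro ⟨h1, h2 | ⟨b, hb, hlt⟩⟩
      · simp at h2
      · injection hb with hb'
        subst hb'
        have hlt' : PySem.Str.find maze p.1 < j := hlt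
        rcases hp with hp | hp
        · exact h1 hp
        · omega
    rw [this]
    exact ih j f (fun q hq => h q (by simp [hq]))

theorem fold_inv (maze : String) : ∀ (ms : List (String × Int)) (acc : Option (Int × Int)) (j : Int),
    (acc = none ∨ ∃ b, acc = some b ∧ j < b.1) →
    (∀ p ∈ ms, PySem.Str.find maze p.1 = -1 ∨ j < PySem.Str.find maze p.1) →
    (ms.foldl
      (fun best p =>
        let i := PySem.Str.find maze p.1
        if i ≠ -1 ∧ (best.isNone ∨ (∃ b, best = some b ∧ i < b.1)) then some (i, p.2) else best)
      acc = none ∨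
    ∃ b, ms.foldl
      (fun best p =>
        let i := PySem.Str.find maze p.1
        if i ≠ -1 ∧ (best.isNone ∨ (∃ b, best = some b ∧ i < b.1)) then some (i, p.2) else best)
      acc = some b ∧ j < b.1) := by
  intro ms
  induction ms with
  | nil => intro acc j hacc _; exact hacc
  | cons p ms ih =>
    intro acc j hacc h
    have hp := h p (by simp)
    rw [List.foldl_cons]
    apply ih _ j _ (fun q hq => h q (by simp [hq]))
    by_cases hc : PySem.Str.find maze p.1 ≠ -1 ∧ (acc.isNone ∨ (∃ b, acc = some b ∧ PySem.Str.find maze p.1 < b.1))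
    · right
      refine ⟨(PySem.Str.find maze p.1, p.2), by rw [if_pos hc], ?_⟩
      rcases hp with hp | hp
      · exact absurd hp hc.1
      · exact hp
    · rw [if_neg hc]
      exact hacc

theorem bestFold_split (maze : String) (ms1 ms2 : List (String × Int)) (pstar : String × Int) (j : Int)
    (hj0 : 0 ≤ j)
    (h1 : ∀ p ∈ ms1, PySem.Str.find maze p.1 = -1 ∨ j < PySem.Str.find maze p.1)
    (hstar : PySem.Str.find maze pstar.1 = j)
    (h2 : ∀ p ∈ ms2, PySem.Str.find maze p.1 = -1 ∨ j < PySem.Str.find maze p.1) :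
    pvBestFold maze (ms1 ++ pstar :: ms2) = some (j, pstar.2) := by
  rw [pvBestFold, List.foldl_append, List.foldl_cons]
  have hacc := fold_inv maze ms1 none j (Or.inl rfl) h1
  set acc := List.foldl
      (fun best p =>
        let i := PySem.Str.find maze p.1
        if i ≠ -1 ∧ (best.isNone = true ∨ ∃ b, best = some b ∧ i < b.1) then some (i, p.2) else best)
      none ms1 with hacceq
  have hstep : (if PySem.Str.find maze pstar.1 ≠ -1 ∧ (acc.isNone = true ∨ ∃ b, acc = some b ∧ PySem.Str.find maze pstar.1 < b.1) then some (PySem.Str.find maze pstar.1, pstar.2) else acc) = some (j, pstar.2) := by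
    rw [if_pos, hstar]
    refine ⟨by rw [hstar]; omega, ?_⟩
    rcases hacc with h | ⟨b, hb, hlt⟩
    · left; rw [h]; rfl
    · right; exact ⟨b, hb, by rw [hstar]; exact hlt⟩
  rw [hstep]
  exact fold_stay maze ms2 j pstar.2 h2

theorem bestFold_spec (maze : String) (j : Nat) (hj : j < maze.toList.length)
    (hm : pvIsMark maze.toList[j] = true)
    (hf : ∀ i (hi : i < j), pvIsMark (maze.toList[i]'(by omega)) = false) :
    pvBestFold maze [("^", 0), (">", 1), ("v", 2), ("<", 3)] =
      some ((j : Int), pvFace maze.toList[j]) := by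
  have hother : ∀ (s : String) (c : Char), s.toList = [c] → pvIsMark c = true → c ≠ maze.toList[j] →
      PySem.Str.find maze s = -1 ∨ (j : Int) < PySem.Str.find maze s := by
    intro s c hs h1 h2
    rw [PySem.Str.find_eq, hs]
    exact find_other_marker maze.toList j hj hf c h1 h2
  have hstar : ∀ (s : String) (c : Char), s.toList = [c] → c = maze.toList[j] →
      PySem.Str.find maze s = (j : Int) := by
    intro s c hs hc
    rw [PySem.Str.find_eq, hs, hc]
    exact find_at_first_marker maze.toList j hj hm hf
  have hm' := hm
  simp only [pvIsMark, Bool.or_eq_true, beq_iff_eq] at hm'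
  have hface : ∀ (v : Int), maze.toList[j] = '^' ∧ v = 0 ∨ maze.toList[j] = '>' ∧ v = 1 ∨
      maze.toList[j] = 'v' ∧ v = 2 ∨ maze.toList[j] = '<' ∧ v = 3 → pvFace maze.toList[j] = v := by
    rintro v (⟨h, rfl⟩ | ⟨h, rfl⟩ | ⟨h, rfl⟩ | ⟨h, rfl⟩) <;> rw [h] <;> rfl
  rcases hm' with ((h | h) | h) | h
  · rw [show ([("^", 0), (">", 1), ("v", 2), ("<", 3)] : List (String × Int)) =
        [] ++ ("^", (0:Int)) :: [(">", 1), ("v", 2), ("<", 3)] from rfl,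
      bestFold_split maze _ _ _ (j : Int) (by omega) (by simp)
        (hstar "^" '^' rfl h.symm)
        (by intro p hp; fin_cases hp <;> exact hother _ _ rfl (by decide) (by rw [h]; decide)),
      hface 0 (by tauto)]
  · rw [show ([("^", 0), (">", 1), ("v", 2), ("<", 3)] : List (String × Int)) =
        [("^", 0)] ++ (">", (1:Int)) :: [("v", 2), ("<", 3)] from rfl,
      bestFold_split maze _ _ _ (j : Int) (by omega)
        (by intro p hp; fin_cases hp <;> exact hother _ _ rfl (by decide) (by rw [h]; decide))
        (hstar ">" '>' rfl h.symm)
        (by intro p hp; fin_cases hp <;> exact hother _ _ rfl (by decide) (by rw [h]; decide)),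
      hface 1 (by tauto)]
  · rw [show ([("^", 0), (">", 1), ("v", 2), ("<", 3)] : List (String × Int)) =
        [("^", 0), (">", 1)] ++ ("v", (2:Int)) :: [("<", 3)] from rfl,
      bestFold_split maze _ _ _ (j : Int) (by omega)
        (by intro p hp; fin_cases hp <;> exact hother _ _ rfl (by decide) (by rw [h]; decide))
        (hstar "v" 'v' rfl h.symm)
        (by intro p hp; fin_cases hp <;> exact hother _ _ rfl (by decide) (by rw [h]; decide)),
      hface 2 (by tauto)]
  · rw [show ([("^", 0), (">", 1), ("v", 2), ("<", 3)] : List (String × Int)) =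
        [("^", 0), (">", 1), ("v", 2)] ++ ("<", (3:Int)) :: [] from rfl,
      bestFold_split maze _ _ _ (j : Int) (by omega)
        (by intro p hp; fin_cases hp <;> exact hother _ _ rfl (by decide) (by rw [h]; decide))
        (hstar "<" '<' rfl h.symm)
        (by intro p hp; simp at hp),
      hface 3 (by tauto)]

theorem main_bridge : ∀ (n : Nat) (cs : List Char), cs.length = n → ∀ (y : Int) (j : Nat) (hj : j < cs.length),
    pvIsMark cs[j] = true → (∀ i (hi : i < j), pvIsMark (cs[i]'(by omega)) = false) →
    pvScanRows y (PySem.Chars.splitOn cs ['\n']) =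
      some [(j : Int) - PySem.Chars.rfind (cs.take j) ['\n'] - 1,
            y + ((cs.take j).count '\n' : Int),
            pvFace cs[j]] := by
  intro n
  induction n using Nat.strong_induction_on with
  | _ n ih =>
  intro cs hlen y j hj hm hf
  by_cases hnl : '\n' ∈ cs
  · -- there is a newline: decompose at the first one
    have hp : cs.findIdx (· == '\n') < cs.length :=
      List.findIdx_lt_length.mpr ⟨'\n', hnl, by simp⟩
    set p := cs.findIdx (· == '\n') with hpdef
    have hpc : cs[p] = '\n' := by simpa using (List.findIdx_getElem (w := hp))
    have hpf : ∀ i (hi : i < p), cs[i]'(by omega) ≠ '\n' := by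
      intro i hi
      have := List.not_of_lt_findIdx (p := (· == '\n')) hi
      simpa using this
    have hrowlen : (cs.take p).length = p := by simp [List.length_take]; omega
    have hnotake : ∀ (k : Nat), k ≤ p → '\n' ∉ cs.take k := by
      intro k hk hmem
      obtain ⟨i, hi, hEq⟩ := List.mem_iff_getElem.mp hmem
      have hilt : i < k := by simp [List.length_take] at hi; omega
      exact hpf i (by omega) (by rw [← hEq]; exact (List.getElem_take).symm)
    have hnlrow : '\n' ∉ cs.take p := hnotake p le_rfl
    have hdecomp : cs = cs.take p ++ '\n' :: cs.drop (p + 1) := by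
      conv_lhs => rw [← List.take_append_drop p cs, List.drop_eq_getElem_cons hp, hpc]
    rcases lt_trichotomy j p with hjp | hjp | hjp
    · -- marker inside the first row
      conv_lhs => rw [hdecomp]
      rw [splitOn_sep '\n' _ _ hnlrow, pvScanRows]
      have hjrow : j < (cs.take p).length := by omega
      rw [scanRow_first y (cs.take p) 0 j hjrow
        (by rw [show (cs.take p)[j] = cs[j] from List.getElem_take]; exact hm)
        (fun i hi => by rw [show (cs.take p)[i]'(by omega) = cs[i]'(by omega) from List.getElem_take]; exact hf i hi)]
      have ht : '\n' ∉ cs.take j := hnotake j (by omega)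
      rw [show (cs.take p)[j]'hjrow = cs[j]'hj from List.getElem_take]
      rw [(rfind_eq_neg_one_iff_single '\n' _).mpr ht, List.count_eq_zero.mpr ht]
      simp <;> omega
    · -- impossible: the marker cell is the newline
      subst hjp
      simp only [hpc] at hm
      simp [pvIsMark] at hm
    · -- marker after the first newline
      set rest := cs.drop (p + 1) with hrestdef
      set j' := j - p - 1 with hj'def
      have hjsum : p + 1 + j' = j := by omega
      have hrestlen : rest.length = cs.length - p - 1 := by
        rw [hrestdef, List.length_drop]; omega
      have hj' : j' < rest.length := by omega
      have hcsj : rest[j']'hj' = cs[j]'hj := by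
        simp only [hrestdef, List.getElem_drop]
        congr 1
      have hmr : pvIsMark rest[j'] = true := by rw [hcsj]; exact hm
      have hfr : ∀ i (hi : i < j'), pvIsMark (rest[i]'(by omega)) = false := by
        intro i hi
        have : rest[i]'(by omega) = cs[p + 1 + i]'(by omega) := by
          simp only [hrestdef, List.getElem_drop]
        rw [this]
        exact hf (p + 1 + i) (by omega)
      conv_lhs => rw [hdecomp]
      rw [splitOn_sep '\n' _ _ hnlrow, pvScanRows]
      rw [scanRow_none y (cs.take p) 0
        (fun i hi => by
          rw [show (cs.take p)[i] = cs[i]'(by omega) from List.getElem_take]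
          exact hf i (by omega))]
      rw [ih rest.length (by omega) rest rfl (y + 1) j' hj' hmr hfr]
      -- now rewrite the right-hand side into the same shape
      have htake : cs.take j = cs.take p ++ '\n' :: rest.take j' := by
        conv_lhs => rw [hdecomp]
        rw [List.take_append]
        congr 1
        · exact List.take_of_length_le (by omega)
        · rw [show j - (cs.take p).length = j' + 1 from by omega]
          rfl
      rw [htake, rfind_append_sep '\n' _ _ hnlrow]
      have hcount : ((cs.take p ++ '\n' :: rest.take j').count '\n' : Int) =
          ((rest.take j').count '\n' : Int) + 1 := by
        rw [List.count_append, List.count_cons]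
        rw [List.count_eq_zero.mpr hnlrow]
        simp
      rw [hcount, ← hcsj]
      by_cases hmem : '\n' ∈ rest.take j'
      · rw [if_pos hmem]
        simp only [Option.some.injEq, List.cons.injEq, and_true]
        refine ⟨?_, by ring⟩
        rw [hrowlen]
        omega
      · rw [if_neg hmem]
        rw [(rfind_eq_neg_one_iff_single '\n' _).mpr hmem]
        simp only [Option.some.injEq, List.cons.injEq, and_true]
        refine ⟨?_, by ring⟩
        rw [hrowlen]
        omega
  · -- single row
    rw [splitOn_no_sep '\n' cs hnl, pvScanRows]
    rw [scanRow_first y cs 0 j hj hm hf]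
    have ht : '\n' ∉ cs.take j := fun h => hnl (List.take_subset j cs h)
    rw [(rfind_eq_neg_one_iff_single '\n' _).mpr ht, List.count_eq_zero.mpr ht]
    simp

theorem final (maze : String) (h : Pre_getRobotPositionAndFacing maze) :
    getRobotPositionAndFacing maze = getRobotPositionAndFacing_alt maze := by
  have hex : ∃ c ∈ maze.toList, pvIsMark c = true := by
    rw [Pre_getRobotPositionAndFacing, List.any_eq_true] at h
    obtain ⟨c, hc, hp⟩ := h
    refine ⟨c, hc, by simp [pvIsMark]; simp at hp; tauto⟩
  have hj : maze.toList.findIdx pvIsMark < maze.toList.length :=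
    List.findIdx_lt_length.mpr hex
  set j := maze.toList.findIdx pvIsMark with hjdef
  have hm : pvIsMark maze.toList[j] = true := List.findIdx_getElem (w := hj)
  have hf : ∀ i (hi : i < j), pvIsMark (maze.toList[i]'(by omega)) = false :=
    fun i hi => List.not_of_lt_findIdx hi
  -- rows of A are the splitOn of the characters
  have hrows : ((PySem.Str.split? maze "\n").getD []).map String.toList =
      PySem.Chars.splitOn maze.toList ['\n'] := by
    have h1 := PySem.Str.split?_map maze "\n"
    rw [show ("\n" : String).toList = ['\n'] from rfl] at h1
    rw [show PySem.Chars.split? maze.toList ['\n'] = some (PySem.Chars.splitOn maze.toList ['\n']) from by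
      rw [PySem.Chars.split?]; rfl] at h1
    cases hsp : PySem.Str.split? maze "\n" with
    | none => rw [hsp] at h1; simp at h1
    | some r => rw [hsp] at h1; simp at h1; simpa using h1
  -- evaluate A
  rw [getRobotPositionAndFacing]
  rw [hrows]
  rw [main_bridge maze.toList.length maze.toList rfl 0 j hj hm hf]
  -- evaluate B
  rw [getRobotPositionAndFacing_alt]
  rw [bestFold_spec maze j hj hm hf]
  simp only
  rw [show PySem.Str.rfind (PySem.Str.slice maze none (some (j : Int))) "\n" =
      PySem.Chars.rfind (maze.toList.take j) ['\n'] from by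
    rw [PySem.Str.rfind_eq, PySem.Str.toList_slice, PySem.Chars.slice_eq_listSlice,
      PySem.List.slice_to maze.toList (by omega)]
    simp]
  rw [show PySem.Str.count (PySem.Str.slice maze none (some (j : Int))) "\n" =
      (maze.toList.take j).count '\n' from by
    rw [PySem.Str.count_eq, PySem.Str.toList_slice, PySem.Chars.slice_eq_listSlice,
      PySem.List.slice_to maze.toList (by omega)]
    rw [show ("\n" : String).toList = ['\n'] from rfl]
    rw [count_single]
    simp]
  simp

-- ===== VERDICT (by name: the statement is the Claim_ definition above) =====
theorem getRobotPositionAndFacing_spec : Claim_equal_getRobotPositionAndFacing := by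
  intro maze _ hpre
  unfold Spec_getRobotPositionAndFacing
  exact final maze hpre
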